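-- pv_equiv track=rewrite | github.com/nongdamgom1over/zaksimsamilllll | 프로그래머스/2/60058. 괄호 변환/괄호 변환.py | is_rightword
-- ===== SOURCE A (Python) =====
-- def is_rightword(w):
--     cnt = 0
--     for ch in w:
--         if ch == "(":
--             cnt += 1
--         else:
--             cnt -= 1
--         if cnt < 0:
--             return False
--     return True
-- ===== SOURCE B (Python) =====
-- def is_rightword(w):
--     # a prefix sum (with '(' = +1, anything else = -1) is nonnegative
--     # exactly when at least half of the prefix's characters are '('
--     return all(2 * w[: i + 1].count("(") >= i + 1 for i in range(len(w)))
-- ===== Notes on version B (the rewrite author's own statement) =====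
-- stated objective: alternative
-- what changed: Replaces A's single-pass running counter with early return by a brute-force prefix check: for each i it recounts '(' in the prefix w[:i+1] from scratch with str.count and requires at least half of the prefix's characters to be '(' (2*count >= len), with no accumulator carried between iterations.
import Mathlib
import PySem

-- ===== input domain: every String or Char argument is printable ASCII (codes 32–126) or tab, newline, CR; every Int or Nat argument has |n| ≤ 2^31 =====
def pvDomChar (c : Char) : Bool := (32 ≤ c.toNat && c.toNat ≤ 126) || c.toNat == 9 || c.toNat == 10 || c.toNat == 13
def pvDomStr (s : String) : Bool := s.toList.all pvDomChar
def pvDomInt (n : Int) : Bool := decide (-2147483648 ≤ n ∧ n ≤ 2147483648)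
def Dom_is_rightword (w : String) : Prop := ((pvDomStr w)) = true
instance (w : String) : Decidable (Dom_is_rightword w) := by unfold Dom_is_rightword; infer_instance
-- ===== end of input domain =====

-- B drops A's running counter entirely: for every prefix it recounts '(' from scratch
-- and checks that at least half of the prefix's characters are '(' (alternative decomposition; not faster).

-- ===== PORT A =====
-- counter loop with early return on cnt < 0
def isRightLoopA : List Char → Int → Bool
  | [], _ => true
  | c :: cs, cnt =>
    let cnt' := if c == '(' then cnt + 1 else cnt - 1
    if cnt' < 0 then false else isRightLoopA cs cnt'

def is_rightword (w : String) : Bool := isRightLoopA w.toList 0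

-- ===== PORT B =====
-- all(2 * w[:i+1].count("(") >= i + 1 for i in range(len(w)))
def is_rightword_alt (w : String) : Bool :=
  (PySem.List.pyRange 0 (PySem.Str.len w) 1).all
    (fun i => decide (i + 1 ≤ 2 * (PySem.Str.count (PySem.Str.slice w none (some (i + 1))) "(" : Int)))

-- ===== PRECONDITION & SPEC =====
def Spec_is_rightword (w : String) (out : Bool) : Prop := out = is_rightword_alt w
instance (w : String) (out : Bool) : Decidable (Spec_is_rightword w out) := by unfold Spec_is_rightword; infer_instance

-- ===== CLAIM (what is proved, stated in full; the proofs are below) =====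
def Claim_equal_is_rightword : Prop := ∀ (w : String), Dom_is_rightword w → Spec_is_rightword w (is_rightword w)

-- ===== LEMMAS AND PROOFS =====

-- PySem's substring counter, specialised to a one-character needle, is List.count
theorem countGo_singleton (a : Char) (l : List Char) (fuel acc : Nat) (h : l.length ≤ fuel) :
    PySem.Chars.count.go [a] fuel l acc = acc + l.count a := by
  induction l generalizing fuel acc with
  | nil => cases fuel <;> simp [PySem.Chars.count.go]
  | cons c cs ih =>
    cases fuel with
    | zero => simp at h
    | succ f =>
      have hf : cs.length ≤ f := by simpa using h
      by_cases hc : a = c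
      · subst hc
        simp [PySem.Chars.count.go, List.isPrefixOf, ih f (acc + 1) hf, ]
        omega
      · simp [PySem.Chars.count.go, List.isPrefixOf, hc, ih f acc hf, Ne.symm hc]

theorem count_singleton (a : Char) (l : List Char) :
    PySem.Chars.count l [a] = l.count a := by
  simp [PySem.Chars.count, countGo_singleton a l l.length 0 le_rfl]

-- A's loop from a nonnegative counter = "every nonempty prefix keeps cnt + balance nonnegative",
-- with the balance written via the '(' count of the prefix
theorem loopA_eq_prefix (cs : List Char) (cnt : Int) (h : 0 ≤ cnt) :
    isRightLoopA cs cnt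
      = (List.range cs.length).all
          (fun k => decide (((k : Int) + 1) ≤ cnt + 2 * ((cs.take (k + 1)).count '(' : Int))) := by
  induction cs generalizing cnt with
  | nil => simp [isRightLoopA]
  | cons c cs ih =>
    by_cases hneg : (if c == '(' then cnt + 1 else cnt - 1) < 0
    · -- cnt = 0 and c ≠ '(' : both sides false (index 0 fails on the right)
      have hc : ¬ c = '(' := by
        intro hc
        simp [hc] at hneg
        omega
      have h0 : cnt = 0 := by simp [hc] at hneg; omega
      simp [isRightLoopA, hc, h0, List.all_eq_false]
      exact ⟨0, by simp, by simp⟩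
    · have hnn : 0 ≤ (if c == '(' then cnt + 1 else cnt - 1) := by omega
      have hrec := ih (if c == '(' then cnt + 1 else cnt - 1) hnn
      simp only [isRightLoopA, if_neg hneg, hrec]
      rw [List.length_cons, List.range_succ_eq_map, List.all_cons, List.all_map]
      have hhead : decide (((0 : Nat) : Int) + 1 ≤ cnt + 2 * (((c :: cs).take (0 + 1)).count '(' : Int)) = true := by
        by_cases hc : c = '(' <;> simp [hc] at hnn ⊢ <;> omega
      rw [hhead, Bool.true_and]
      refine List.all_congr rfl fun k => ?_
      simp only [Function.comp_apply, List.take_succ_cons, List.count_cons]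
      apply decide_eq_decide.mpr
      by_cases hc : c = '(' <;> simp [hc] <;> omega

-- B's port rewritten over the char list with a Nat range
theorem alt_eq_prefix (w : String) :
    is_rightword_alt w
      = (List.range w.toList.length).all
          (fun k => decide (((k : Int) + 1) ≤ 2 * ((w.toList.take (k + 1)).count '(' : Int))) := by
  unfold is_rightword_alt
  rw [PySem.List.pyRange_one]
  simp only [PySem.Str.len_eq, Int.sub_zero, Int.toNat_natCast, List.all_map]
  refine List.all_congr rfl fun k => ?_
  have hb : (0 : Int) ≤ (k : Int) + 1 := by omega
  simp only [Function.comp_apply, Int.zero_add, PySem.Str.count_eq, PySem.Str.toList_slice,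
    PySem.Chars.slice_eq_listSlice, PySem.List.slice_to _ hb]
  rw [show ((k : Int) + 1).toNat = k + 1 by omega,
      show ("(" : String).toList = ['('] from rfl, count_singleton]

-- ===== VERDICT (by name: the statement is the Claim_ definition above) =====
theorem is_rightword_spec : Claim_equal_is_rightword := by
  intro w _
  unfold Spec_is_rightword is_rightword
  rw [alt_eq_prefix, loopA_eq_prefix w.toList 0 le_rfl]
  exact List.all_congr rfl fun k => by simp
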